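-- pv_equiv track=rewrite | github.com/LiliaG-hiramatsu/Informatica | TP_4/Ejercicio6.py | count_palabra
-- ===== SOURCE A (Python) =====
-- def count_palabra(texto):
--     contador = 0
--     esp = ' '
--     salto = '\n'
--     for espacio in texto:
--         if espacio == esp or espacio == salto:
--             contador += 1
--     return contador
-- ===== SOURCE B (Python) =====
-- def count_palabra(texto):
--     limpio = texto.replace(' ', '').replace('\n', '')
--     return len(texto) - len(limpio)
-- ===== Notes on version B (the rewrite author's own statement) =====
-- stated objective: alternative
-- what changed: Instead of counting matches with a conditional accumulator loop, B deletes all spaces and newlines via str.replace and returns the length difference (delete-and-measure).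
import Mathlib
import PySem

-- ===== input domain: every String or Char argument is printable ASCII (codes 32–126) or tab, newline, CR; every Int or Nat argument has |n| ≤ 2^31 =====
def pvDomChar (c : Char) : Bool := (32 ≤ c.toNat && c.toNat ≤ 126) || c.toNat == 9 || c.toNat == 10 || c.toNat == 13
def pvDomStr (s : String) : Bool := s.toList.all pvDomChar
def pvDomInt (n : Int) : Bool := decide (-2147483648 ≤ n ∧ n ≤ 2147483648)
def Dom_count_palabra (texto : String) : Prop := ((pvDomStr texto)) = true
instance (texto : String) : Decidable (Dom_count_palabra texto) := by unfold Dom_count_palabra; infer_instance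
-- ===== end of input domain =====

-- B deletes all spaces and newlines with str.replace and returns the length difference, instead of A's conditional accumulator loop (alternative).

-- ===== PORT A =====
-- literal port: contador = 0; for espacio in texto: if espacio == ' ' or espacio == '\n': contador += 1
def count_palabra (texto : String) : Int :=
  texto.toList.foldl (fun contador espacio =>
    if espacio == ' ' || espacio == '\n' then contador + 1 else contador) 0

-- ===== PORT B =====
-- limpio = texto.replace(' ', '').replace('\n', ''); return len(texto) - len(limpio)
def count_palabra_alt (texto : String) : Int :=
  let limpio := PySem.Str.replace (PySem.Str.replace texto " " "") "\n" ""
  PySem.Str.len texto - PySem.Str.len limpio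

-- ===== PRECONDITION & SPEC =====
def Spec_count_palabra (texto : String) (out : Int) : Prop := out = count_palabra_alt texto
instance (texto : String) (out : Int) : Decidable (Spec_count_palabra texto out) := by unfold Spec_count_palabra; infer_instance

-- ===== CLAIM (what is proved, stated in full; the proofs are below) =====
def Claim_equal_count_palabra : Prop := ∀ (texto : String), Dom_count_palabra texto → Spec_count_palabra texto (count_palabra texto)

-- ===== LEMMAS AND PROOFS =====

-- ===== VERDICT (by name: the statement is the Claim_ definition above) =====
-- replacing a single character by the empty string is a filter
theorem replace_go_singleton_empty (c : Char) (fuel : Nat) (l : List Char) (acc : List Char)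
    (h : l.length ≤ fuel) :
    PySem.Chars.replace.go [c] [] fuel l acc = acc.reverse ++ l.filter (fun x => x != c) := by
  induction fuel generalizing l acc with
  | zero =>
    have hl : l = [] := List.length_eq_zero_iff.mp (Nat.le_zero.mp h)
    subst hl
    simp [PySem.Chars.replace.go]
  | succ n ih =>
    cases l with
    | nil => simp [PySem.Chars.replace.go]
    | cons x t =>
      have ht : t.length ≤ n := by simpa using h
      rw [PySem.Chars.replace.go]
      by_cases hc : x = c
      · subst hc
        have hp : List.isPrefixOf [x] (x :: t) = true := by simp [List.isPrefixOf]
        simp only [hp, if_pos]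
        rw [show List.drop [x].length (x :: t) = t from rfl, ih t _ ht]
        simp
      · have hp : List.isPrefixOf [c] (x :: t) = false := by
          simp [List.isPrefixOf]
          exact fun hh => absurd hh.symm hc
        simp only [hp, Bool.false_eq_true, if_false]
        rw [ih t _ ht]
        simp [hc]

theorem replace_singleton_empty (s : List Char) (c : Char) :
    PySem.Chars.replace s [c] [] = s.filter (fun x => x != c) := by
  simp only [PySem.Chars.replace, List.isEmpty, reduceCtorEq, if_false]
  rw [replace_go_singleton_empty c s.length s [] le_rfl]
  simp

-- counting hits equals length minus what survives the double filter
theorem countP_filter_balance (l : List Char) :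
    l.countP (fun espacio => espacio == ' ' || espacio == '\n')
      + ((l.filter (fun x => x != ' ')).filter (fun x => x != '\n')).length = l.length := by
  induction l with
  | nil => simp
  | cons h t ih =>
    by_cases h1 : h = ' ' <;> by_cases h2 : h = '\n' <;>
      simp_all <;> omega

-- ===== VERDICT (by name: the statement is the Claim_ definition above) =====
theorem count_palabra_spec : Claim_equal_count_palabra := by
  intro texto _
  unfold Spec_count_palabra count_palabra count_palabra_alt
  simp only [PySem.Str.len_eq, PySem.Str.toList_replace]
  rw [show (" ".toList) = [' '] from rfl, show ("\n".toList) = ['\n'] from rfl,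
      show ("".toList) = ([] : List Char) from rfl]
  rw [replace_singleton_empty, replace_singleton_empty]
  rw [PySem.List.foldl_if_add_one (fun espacio => espacio == ' ' || espacio == '\n')]
  have := countP_filter_balance texto.toList
  omega
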